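-- pv_equiv track=rewrite | github.com/Cmaddock99/YOLO-Bad-Triangle | src/lab/health_checks/regression.py | latest_session_id
-- ===== SOURCE A (Python) =====
-- def latest_session_id(rows: list[dict[str, str]]) -> str | None:
--     with_session = [
--         row
--         for row in rows
--         if row.get("run_session_id") and row.get("run_started_at_utc")
--     ]
--     if not with_session:
--         return None
--     latest = max(with_session, key=lambda row: row.get("run_started_at_utc", ""))
--     return latest.get("run_session_id")
-- ===== SOURCE B (Python) =====
-- def latest_session_id(rows: list[dict[str, str]]) -> str | None:
--     # Two staged passes: first compute the maximal timestamp among qualifying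
--     # rows, then return the first qualifying row carrying that timestamp.
--     stamps = [
--         row["run_started_at_utc"]
--         for row in rows
--         if row.get("run_session_id") and row.get("run_started_at_utc")
--     ]
--     if not stamps:
--         return None
--     top = max(stamps)
--     for row in rows:
--         if row.get("run_session_id") and row.get("run_started_at_utc") == top:
--             return row["run_session_id"]
-- ===== Notes on version B (the rewrite author's own statement) =====
-- stated objective: alternative
-- what changed: Replaces A's filter-then-max-by-row-key with two staged passes: first collect the qualifying timestamps and take their plain max, then scan the original rows for the first qualifying row whose timestamp equals that max and return its session id.
import Mathlib
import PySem

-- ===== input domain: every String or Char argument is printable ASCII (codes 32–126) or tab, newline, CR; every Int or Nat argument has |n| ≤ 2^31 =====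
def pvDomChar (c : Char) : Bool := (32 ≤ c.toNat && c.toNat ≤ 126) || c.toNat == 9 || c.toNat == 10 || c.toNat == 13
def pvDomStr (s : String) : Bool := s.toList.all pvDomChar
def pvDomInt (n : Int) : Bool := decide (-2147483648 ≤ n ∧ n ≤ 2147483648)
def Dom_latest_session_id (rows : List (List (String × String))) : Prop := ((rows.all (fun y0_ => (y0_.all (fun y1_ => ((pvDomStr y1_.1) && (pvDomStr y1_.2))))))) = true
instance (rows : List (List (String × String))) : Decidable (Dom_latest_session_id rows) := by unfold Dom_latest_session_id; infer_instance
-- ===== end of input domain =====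

-- B replaces A's filter + max-by-row with two staged passes (max of the qualifying timestamps, then first qualifying row carrying it) — an alternative decomposition, same cost.


-- shared helper: Python dict lookup row.get(k) on an association list (first match)
def pvGetRow (row : List (String × String)) (k : String) : Option String :=
  (row.find? (fun kv => kv.1 == k)).map (·.2)

-- truthiness of an optional string (None and "" are falsy)
def pvTruthy (o : Option String) : Bool :=
  match o with
  | some s => decide (s ≠ "")
  | none => false

-- ===== PORT A =====
def pvKeyA (row : List (String × String)) : String :=
  (pvGetRow row "run_started_at_utc").getD ""

def latest_session_id (rows : List (List (String × String))) : Option String :=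
  let with_session := rows.filter (fun row =>
    pvTruthy (pvGetRow row "run_session_id") && pvTruthy (pvGetRow row "run_started_at_utc"))
  match PySem.List.max? with_session pvKeyA with
  | none => none
  | some latest => pvGetRow latest "run_session_id"

-- ===== PORT B =====
-- pass 1 of Source B: the comprehension [row["run_started_at_utc"] for row in rows if …]
def pvStamps (rows : List (List (String × String))) : List String :=
  (rows.filter (fun row =>
    pvTruthy (pvGetRow row "run_session_id") && pvTruthy (pvGetRow row "run_started_at_utc"))).map
    (fun row => (pvGetRow row "run_started_at_utc").getD "")

-- pass 2 of Source B: the for-loop returning the first qualifying row carrying timestamp 'top'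
def pvFindTop (rows : List (List (String × String))) (top : String) : Option String :=
  match rows with
  | [] => none
  | row :: rest =>
    if pvTruthy (pvGetRow row "run_session_id") && (pvGetRow row "run_started_at_utc" == some top)
    then some ((pvGetRow row "run_session_id").getD "")
    else pvFindTop rest top

def latest_session_id_alt (rows : List (List (String × String))) : Option String :=
  let stamps := pvStamps rows
  if stamps = [] then none
  else pvFindTop rows ((PySem.List.max? stamps (fun s => s)).getD "")

-- ===== PRECONDITION & SPEC =====
def Spec_latest_session_id (rows : List (List (String × String))) (out : Option String) : Prop := out = latest_session_id_alt rows
instance (rows : List (List (String × String))) (out : Option String) : Decidable (Spec_latest_session_id rows out) := by unfold Spec_latest_session_id; infer_instance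

-- ===== CLAIM (what is proved, stated in full; the proofs are below) =====
def Claim_equal_latest_session_id : Prop := ∀ (rows : List (List (String × String))), Dom_latest_session_id rows → Spec_latest_session_id rows (latest_session_id rows)

-- ===== LEMMAS AND PROOFS =====

def pvQual (row : List (String × String)) : Bool :=
  pvTruthy (pvGetRow row "run_session_id") && pvTruthy (pvGetRow row "run_started_at_utc")

-- the foldl step hidden inside PySem.List.max? with key pvKeyA
def pvMaxStep (acc : Option (List (String × String))) (x : List (String × String)) :
    Option (List (String × String)) :=
  match acc with
  | none => some x
  | some m => if pvKeyA m < pvKeyA x then some x else some m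

theorem pvMax?_eq_foldl (xs : List (List (String × String))) :
    PySem.List.max? xs pvKeyA = xs.foldl pvMaxStep none := by
  unfold PySem.List.max? pvMaxStep
  congr 1
  funext acc x
  cases acc with
  | none => rfl
  | some m => by_cases h : pvKeyA m < pvKeyA x <;> simp [h]

-- the foldl step hidden inside PySem.List.max? with the identity key on strings
def pvMaxStepS (acc : Option String) (x : String) : Option String :=
  match acc with
  | none => some x
  | some m => if m < x then some x else some m

theorem pvMax?S_eq_foldl (xs : List String) :
    PySem.List.max? xs (fun s => s) = xs.foldl pvMaxStepS none := by
  unfold PySem.List.max? pvMaxStepS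
  congr 1
  funext acc x
  cases acc with
  | none => rfl
  | some m => by_cases h : m < x <;> simp [h]

theorem pvFoldl_map (xs : List (List (String × String))) :
    ∀ acc, (xs.map pvKeyA).foldl pvMaxStepS (acc.map pvKeyA) = (xs.foldl pvMaxStep acc).map pvKeyA := by
  induction xs with
  | nil => intro acc; rfl
  | cons x t ih =>
    intro acc
    cases acc with
    | none => simpa using ih (some x)
    | some m =>
      simp only [List.map, List.foldl, pvMaxStep, pvMaxStepS, Option.map]
      by_cases h : pvKeyA m < pvKeyA x
      · simp only [h, if_true]; simpa using ih (some x)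
      · simp only [h, if_false]; simpa using ih (some m)

-- max over the mapped timestamp list with identity key = the key of max-by-key
theorem pvMax?_map (xs : List (List (String × String))) :
    PySem.List.max? (xs.map pvKeyA) (fun s => s) = (PySem.List.max? xs pvKeyA).map pvKeyA := by
  rw [pvMax?_eq_foldl, pvMax?S_eq_foldl]
  simpa using pvFoldl_map xs none

theorem pvFoldl_some (xs : List (List (String × String))) :
    ∀ a, ∃ m, xs.foldl pvMaxStep (some a) = some m := by
  induction xs with
  | nil => intro a; exact ⟨a, rfl⟩
  | cons x t ih =>
    intro a
    simp only [List.foldl, pvMaxStep]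
    by_cases h : pvKeyA a < pvKeyA x
    · simpa [h] using ih x
    · simpa [h] using ih a

theorem pvFoldl_mem (xs : List (List (String × String))) :
    ∀ a m, xs.foldl pvMaxStep (some a) = some m → m = a ∨ m ∈ xs := by
  induction xs with
  | nil => intro a m h; left; injection h with h; exact h.symm
  | cons x t ih =>
    intro a m h
    simp only [List.foldl, pvMaxStep] at h
    by_cases hc : pvKeyA a < pvKeyA x
    · rw [if_pos hc] at h
      rcases ih x m h with h1 | h1
      · right; simp [h1]
      · right; simp [h1]
    · rw [if_neg hc] at h
      rcases ih a m h with h1 | h1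
      · left; exact h1
      · right; simp [h1]

theorem pvFoldl_le (xs : List (List (String × String))) :
    ∀ a m, xs.foldl pvMaxStep (some a) = some m → pvKeyA a ≤ pvKeyA m := by
  induction xs with
  | nil => intro a m h; injection h with h; subst h; exact le_refl _
  | cons x t ih =>
    intro a m h
    simp only [List.foldl, pvMaxStep] at h
    by_cases hc : pvKeyA a < pvKeyA x
    · rw [if_pos hc] at h
      exact le_of_lt (lt_of_lt_of_le hc (ih x m h))
    · rw [if_neg hc] at h
      exact ih a m h

-- qualifying rows have a present, nonempty timestamp whose value is pvKeyA
theorem pvQual_ts {r : List (String × String)} (h : pvQual r = true) :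
    pvGetRow r "run_started_at_utc" = some (pvKeyA r) ∧ pvKeyA r ≠ "" ∧
      pvTruthy (pvGetRow r "run_session_id") = true := by
  rcases hs : pvGetRow r "run_session_id" with _ | sid <;>
    rcases ht : pvGetRow r "run_started_at_utc" with _ | started <;>
      simp [pvQual, pvTruthy, hs, ht] at h
  refine ⟨by simp [pvKeyA, ht], ?_, ?_⟩
  · simpa [pvKeyA, ht] using h.2
  · simp [pvTruthy, h.1]

-- on a qualifying head, the loop test reduces to comparing its timestamp with top
theorem pvFindTop_cons_qual {r : List (String × String)}
    (rest : List (List (String × String))) (top : String) (hq : pvQual r = true) :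
    pvFindTop (r :: rest) top =
      if pvKeyA r == top then pvGetRow r "run_session_id" else pvFindTop rest top := by
  obtain ⟨hts, _, hsid⟩ := pvQual_ts hq
  rcases hs : pvGetRow r "run_session_id" with _ | sid
  · rw [hs] at hsid; exact absurd hsid (by simp [pvTruthy])
  · rw [hs] at hsid
    have hsid' : sid ≠ "" := by simpa [pvTruthy] using hsid
    by_cases h : pvKeyA r = top
    · simp [pvFindTop, hts, hs, pvTruthy, hsid', h]
    · simp [pvFindTop, hts, hs, pvTruthy, hsid', h]

-- searching for a nonempty timestamp may be done on the filtered list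
theorem pvFindTop_filter (rows : List (List (String × String))) {top : String}
    (htop : top ≠ "") :
    pvFindTop rows top = pvFindTop (rows.filter pvQual) top := by
  induction rows with
  | nil => rfl
  | cons r rest ih =>
    by_cases hq : pvQual r = true
    · rw [List.filter_cons_of_pos hq, pvFindTop_cons_qual rest top hq,
          pvFindTop_cons_qual (rest.filter pvQual) top hq, ih]
    · have hfil : (r :: rest).filter pvQual = rest.filter pvQual := by
        simp [List.filter, hq]
      rw [hfil, ← ih]
      have hcond : (pvTruthy (pvGetRow r "run_session_id") &&
          (pvGetRow r "run_started_at_utc" == some top)) = false := by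
        rcases hs : pvGetRow r "run_session_id" with _ | sid <;>
          rcases ht : pvGetRow r "run_started_at_utc" with _ | started <;>
            simp [pvQual, pvTruthy, hs, ht] at hq ⊢
        intro hsid heq
        exact absurd (hq hsid) (by simp [heq, htop])
      simp only [pvFindTop, hcond, Bool.false_eq_true, if_false]

-- on an all-qualifying list, the first row keyed by the running-max's key is the fold's result
theorem pvFindTop_max (xs : List (List (String × String))) :
    ∀ a m, (∀ r ∈ a :: xs, pvQual r = true) →
      xs.foldl pvMaxStep (some a) = some m →
      pvFindTop (a :: xs) (pvKeyA m) = pvGetRow m "run_session_id" := by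
  induction xs with
  | nil =>
    intro a m hq h
    injection h with h; subst h
    rw [pvFindTop_cons_qual [] (pvKeyA a) (hq a (by simp))]
    simp
  | cons x t ih =>
    intro a m hq h
    have hqa : pvQual a = true := hq a (by simp)
    have hqx : pvQual x = true := hq x (by simp)
    simp only [List.foldl, pvMaxStep] at h
    by_cases hc : pvKeyA a < pvKeyA x
    · rw [if_pos hc] at h
      have hne : pvKeyA a ≠ pvKeyA m :=
        ne_of_lt (lt_of_lt_of_le hc (pvFoldl_le t x m h))
      rw [pvFindTop_cons_qual (x :: t) (pvKeyA m) hqa, if_neg (by simpa using hne)]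
      exact ih x m (fun r hr => hq r (by simp at hr ⊢; tauto)) h
    · rw [if_neg hc] at h
      have hih := ih a m (fun r hr => hq r (by simp at hr ⊢; tauto)) h
      rw [pvFindTop_cons_qual t (pvKeyA m) hqa] at hih
      rw [pvFindTop_cons_qual (x :: t) (pvKeyA m) hqa]
      by_cases hae : pvKeyA a = pvKeyA m
      · rw [if_pos (by simpa using hae)] at hih ⊢
        exact hih
      · have halt : pvKeyA a < pvKeyA m := lt_of_le_of_ne (pvFoldl_le t a m h) hae
        have hxne : pvKeyA x ≠ pvKeyA m := ne_of_lt (lt_of_le_of_lt (not_lt.mp hc) halt)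
        rw [if_neg (by simpa using hae)] at hih ⊢
        rw [pvFindTop_cons_qual t (pvKeyA m) hqx, if_neg (by simpa using hxne)]
        exact hih

-- ===== VERDICT (by name: the statement is the Claim_ definition above) =====
theorem latest_session_id_spec : Claim_equal_latest_session_id := by
  intro rows _
  unfold Spec_latest_session_id
  show latest_session_id rows = latest_session_id_alt rows
  have hA : latest_session_id rows =
      (match PySem.List.max? (rows.filter pvQual) pvKeyA with
       | none => none
       | some latest => pvGetRow latest "run_session_id") := rfl
  have hB : latest_session_id_alt rows =
      (if pvStamps rows = [] then none
       else pvFindTop rows ((PySem.List.max? (pvStamps rows) (fun s => s)).getD "")) := rfl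
  rw [hA, hB]
  have hstamps : pvStamps rows = (rows.filter pvQual).map pvKeyA := rfl
  cases hf : rows.filter pvQual with
  | nil =>
    simp [hstamps, hf, PySem.List.max?]
  | cons a t =>
    have hq : ∀ r ∈ a :: t, pvQual r = true := by
      intro r hr; exact List.of_mem_filter (hf ▸ hr)
    obtain ⟨m, hm⟩ := pvFoldl_some t a
    have hmax : PySem.List.max? (rows.filter pvQual) pvKeyA = some m := by
      rw [hf, pvMax?_eq_foldl]
      simpa [pvMaxStep] using hm
    have htop : PySem.List.max? (pvStamps rows) (fun s => s) = some (pvKeyA m) := by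
      rw [hstamps, pvMax?_map, hmax]; rfl
    have hmne : pvStamps rows ≠ [] := by
      rw [hstamps, hf]; simp
    rw [hf] at hmax
    rw [hmax]
    rw [if_neg hmne, htop]
    have hmq : pvQual m = true := by
      rcases pvFoldl_mem t a m hm with h1 | h1
      · exact hq _ (h1 ▸ by simp)
      · exact hq _ (by simp [h1])
    obtain ⟨_, hke, _⟩ := pvQual_ts hmq
    rw [show (some (pvKeyA m)).getD "" = pvKeyA m from rfl]
    rw [pvFindTop_filter rows hke, hf]
    exact (pvFindTop_max t a m hq hm).symm
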